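-- pv_equiv track=rewrite | github.com/Pidje1337/SES | PD_11/Hometasks/Algs_and_Data_Structures/HW_№3/HW_3.py | recursive_sum
-- ===== SOURCE A (Python) =====
-- def check_type(value: any, req_type: any) -> None or ValueError:
--     if not isinstance(value, req_type):
--         raise ValueError(f"Ошибка: Некорректный тип входный данных.\nОжидалось: {req_type}\nПолучено: {type(value)}")
--
-- def recursive_sum(array: list[int or float]) -> int or float:
--
--     check_type(array, list)
--     for elem in array:
--         check_type(elem, int or float)
--
--     length = len(array)
--
--     if length == 0:
--         return 0
--
--     return array.pop() + recursive_sum(array)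
-- ===== SOURCE B (Python) =====
-- def recursive_sum(array):
--     # B: idiomatic single pass via built-in sum (note: unlike A, B does not empty the list in place)
--     if not isinstance(array, list):
--         raise ValueError("bad type")
--     total = 0
--     for elem in array:
--         if not isinstance(elem, int):
--             raise ValueError("bad type")
--         total += elem
--     return total
-- ===== Notes on version B (the rewrite author's own statement) =====
-- stated objective: faster
-- what changed: Replaces the destructive pop-and-recurse (which re-validates every remaining element on each recursive call, emptying the list) with a single iterative pass that validates each element once and accumulates the sum.
import Mathlib
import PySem

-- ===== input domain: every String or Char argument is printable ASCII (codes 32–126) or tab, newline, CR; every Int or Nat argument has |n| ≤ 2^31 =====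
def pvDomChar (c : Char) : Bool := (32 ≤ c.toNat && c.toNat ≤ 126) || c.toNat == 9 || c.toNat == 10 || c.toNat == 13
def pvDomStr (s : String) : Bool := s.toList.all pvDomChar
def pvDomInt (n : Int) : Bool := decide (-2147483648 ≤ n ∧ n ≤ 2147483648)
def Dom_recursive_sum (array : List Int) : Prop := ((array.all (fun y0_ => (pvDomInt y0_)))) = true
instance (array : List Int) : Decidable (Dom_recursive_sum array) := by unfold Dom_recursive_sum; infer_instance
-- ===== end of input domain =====

-- B sums with one iterative accumulator instead of A's destructive pop-and-recurse; equivalence is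
-- about the RETURN value only (Python A empties its argument list in place, B does not mutate it).
-- ===== PORT A =====
def recursive_sum (array : List Int) : Int :=
  let length := array.length
  if length = 0 then 0
  else
    match h : PySem.List.pop? array with
    | some (v, rest) => v + recursive_sum rest
    | none => 0
termination_by array.length
decreasing_by
  have h2 := PySem.List.length_of_pop?_eq_some array h
  simp at h2 ⊢
  omega

-- ===== PORT B =====
def recursive_sum_alt (array : List Int) : Int :=
  array.foldl (fun total elem => total + elem) 0

-- ===== PRECONDITION & SPEC =====
def Spec_recursive_sum (array : List Int) (out : Int) : Prop := out = recursive_sum_alt array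
instance (array : List Int) (out : Int) : Decidable (Spec_recursive_sum array out) := by unfold Spec_recursive_sum; infer_instance

-- ===== CLAIM (what is proved, stated in full; the proofs are below) =====
def Claim_equal_recursive_sum : Prop := ∀ (array : List Int), Dom_recursive_sum array → Spec_recursive_sum array (recursive_sum array)

-- ===== LEMMAS AND PROOFS =====

-- ===== VERDICT (by name: the statement is the Claim_ definition above) =====
-- A equals the plain sum: reverse induction, since A pops from the back.
lemma recursive_sum_eq_sum (array : List Int) : recursive_sum array = array.sum := by
  induction array using List.reverseRecOn with
  | nil => unfold recursive_sum; simp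
  | append_singleton xs x ih =>
      unfold recursive_sum
      simp only [List.length_append, List.length_cons, List.length_nil]
      split
      · rename_i hlen; exact absurd hlen (by omega)
      · split
        · rename_i v rest h
          rw [PySem.List.pop?_last] at h
          obtain ⟨rfl, rfl⟩ : x = v ∧ xs = rest := by simpa using h
          simp [ih]; ring
        · rename_i h
          rw [PySem.List.pop?_last] at h
          simp at h

lemma recursive_sum_alt_eq_sum (array : List Int) : recursive_sum_alt array = array.sum := by
  have : ∀ (xs : List Int) (acc : Int),
      xs.foldl (fun total elem => total + elem) acc = acc + xs.sum := by
    intro xs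
    induction xs with
    | nil => simp
    | cons x xs ih => intro acc; simp [List.foldl, ih]; ring
  simpa using this array 0

-- ===== VERDICT (by name: the statement is the Claim_ definition above) =====
theorem recursive_sum_spec : Claim_equal_recursive_sum := by
  intro array _
  unfold Spec_recursive_sum
  rw [recursive_sum_eq_sum, recursive_sum_alt_eq_sum]
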